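-- pv_equiv track=rewrite | github.com/baxthus/AdventOfCode | 2015/Day20/main.py | find_lowest_house2
-- ===== SOURCE A (Python) =====
-- def find_lowest_house2(target_presents):
--     max_houses = target_presents // 11 + 1
--     house_presents = [0] * max_houses
--     for elf in range(1, len(house_presents)):
--         for house in range(elf, min(elf * 50, len(house_presents)), elf):
--             house_presents[house] += elf * 11
--     for house_number in range(1, len(house_presents)):
--         if house_presents[house_number] >= target_presents:
--             return house_number
-- ===== SOURCE B (Python) =====
-- def find_lowest_house2(target_presents):
--     max_houses = target_presents // 11 + 1
--     for house in range(1, max_houses):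
--         presents = 0
--         for k in range(1, 50):
--             if house % k == 0:
--                 presents += (house // k) * 11
--         if presents >= target_presents:
--             return house
-- ===== Notes on version B (the rewrite author's own statement) =====
-- stated objective: alternative
-- what changed: A's elf-driven sieve that scatters 11*elf into a shared house_presents array (then scans it) is replaced by a house-driven gather that computes each house's presents directly as a capped divisor sum over quotients k=1..49 and returns at the first hit, needing no array at all.
-- outside the precondition, e.g. on find_lowest_house2(12): A returns None, B returns None; on find_lowest_house2(0): A returns None, B returns None
import Mathlib
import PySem

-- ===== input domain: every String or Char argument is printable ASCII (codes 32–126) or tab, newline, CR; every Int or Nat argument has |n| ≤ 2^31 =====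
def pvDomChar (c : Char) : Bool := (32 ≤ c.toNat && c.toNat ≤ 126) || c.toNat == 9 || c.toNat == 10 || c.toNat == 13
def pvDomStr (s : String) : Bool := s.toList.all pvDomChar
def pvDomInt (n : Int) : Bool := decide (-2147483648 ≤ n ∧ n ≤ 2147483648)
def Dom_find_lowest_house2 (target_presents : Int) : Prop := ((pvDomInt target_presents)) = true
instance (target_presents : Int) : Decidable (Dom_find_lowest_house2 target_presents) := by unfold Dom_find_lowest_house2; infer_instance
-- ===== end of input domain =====

-- B replaces A's elf-driven sieve (scatter into a shared presents array) by a per-house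
-- divisor-sum gather with early exit; objective: alternative decomposition, same return value.

-- ===== PORT A =====
-- Python's house_presents list of ints is modelled by Array Int; every index written or read
-- is house with elf ≤ house < min(elf*50, len) (in bounds, nonnegative), so setIfInBounds /
-- getD / .toNat are exact here.
-- inner loop 'for house in range(elf, min(elf*50, len(hp)), elf): hp[house] += elf*11'
def pvElfScatter (elf : Int) (a : Array Int) : Array Int :=
  (PySem.List.pyRange elf (min (elf * 50) ((a.size : Int))) elf).foldl
    (fun a house => a.setIfInBounds house.toNat (a.getD house.toNat 0 + elf * 11)) a

-- outer loop 'for elf in range(1, len(hp))' as a counter recursion (bound L read once)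
def pvSieve (L elf : Int) (a : Array Int) : Array Int :=
  if h : elf < L then pvSieve L (elf + 1) (pvElfScatter elf a) else a
  termination_by (L - elf).toNat
  decreasing_by omega

-- final loop 'for house_number in range(1, len(hp)): if hp[house_number] >= target: return …';
-- Python returns None on fall-through (excluded by Pre_), the port returns 0 there
def pvScan (t L house : Int) (a : Array Int) : Int :=
  if h : house < L then
    (if t ≤ a.getD house.toNat 0 then house else pvScan t L (house + 1) a)
  else 0
  termination_by (L - house).toNat
  decreasing_by omega

def find_lowest_house2 (target_presents : Int) : Int :=
  let max_houses : Int := PySem.Int.floordiv target_presents 11 + 1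
  let house_presents : Array Int := Array.replicate max_houses.toNat 0
  let hp : Array Int := pvSieve ((house_presents.size : ℕ) : Int) 1 house_presents
  pvScan target_presents ((hp.size : ℕ) : Int) 1 hp

-- ===== PORT B =====
-- B's inner loop: presents for one house, gathered from quotients k = 1..49
def pvPresents (house : Int) : Int :=
  (PySem.List.pyRange 1 50 1).foldl
    (fun s k => if PySem.Int.mod house k == 0 then s + PySem.Int.floordiv house k * 11 else s) 0

-- B's outer loop 'for house in range(1, max_houses)' with early return;
-- Python returns None on fall-through (excluded by Pre_), the port returns 0 there
def pvSearch (t mh house : Int) : Int :=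
  if h : house < mh then
    (if t ≤ pvPresents house then house else pvSearch t mh (house + 1))
  else 0
  termination_by (mh - house).toNat
  decreasing_by omega

def find_lowest_house2_alt (target_presents : Int) : Int :=
  let max_houses : Int := PySem.Int.floordiv target_presents 11 + 1
  pvSearch target_presents max_houses 1

-- ===== PRECONDITION & SPEC =====
-- Pre_ excludes exactly the targets on which Python A falls off its final loop and returns
-- None (not an int): every target ≤ 0, and the small targets 1..21 other than 11, whose
-- window [1, target//11] holds no house with a capped divisor sum reaching the target
-- (for every target ≥ 22 an even house just below target//11 always reaches it).
-- B's Python returns None on exactly the same targets.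
def Pre_find_lowest_house2 (target_presents : Int) : Prop :=
  target_presents = 11 ∨ 22 ≤ target_presents
instance (target_presents : Int) : Decidable (Pre_find_lowest_house2 target_presents) := by
  unfold Pre_find_lowest_house2; infer_instance

def pvWitness_find_lowest_house2 : Int := 11

def Spec_find_lowest_house2 (target_presents : Int) (out : Int) : Prop := out = find_lowest_house2_alt target_presents
instance (target_presents : Int) (out : Int) : Decidable (Spec_find_lowest_house2 target_presents out) := by unfold Spec_find_lowest_house2; infer_instance

-- ===== CLAIM (what is proved, stated in full; the proofs are below) =====
def Claim_equal_find_lowest_house2 : Prop := ∀ (target_presents : Int), Dom_find_lowest_house2 target_presents → Pre_find_lowest_house2 target_presents → Spec_find_lowest_house2 target_presents (find_lowest_house2 target_presents)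

-- ===== LEMMAS AND PROOFS =====

-- one array update: effect of a[i] += v on every cell
lemma pv_setadd_getD (a : Array Int) (i : Nat) (v : Int) (hi : i < a.size) (h : Nat) :
    (a.setIfInBounds i (a.getD i 0 + v)).getD h 0 = a.getD h 0 + (if h = i then v else 0) := by
  rw [Array.getD_eq_getD_getElem?, Array.getD_eq_getD_getElem?, Array.getElem?_setIfInBounds]
  by_cases hhi : h = i
  · subst hhi
    simp [hi, Array.getD_eq_getD_getElem?]
  · rw [if_neg (fun hc => hhi (Eq.symm hc)), if_neg hhi, Array.getD_eq_getD_getElem?, add_zero]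

-- inner sieve loop (one elf): adds v at every index listed in `houses`, nothing elsewhere
lemma pv_inner_inv (v : Int) (houses : List Int) (a : Array Int)
    (hnd : houses.Nodup) (hb : ∀ x ∈ houses, 0 ≤ x ∧ x.toNat < a.size) :
    (houses.foldl (fun a house => a.setIfInBounds house.toNat (a.getD house.toNat 0 + v)) a).size = a.size ∧
    ∀ h : Nat,
      (houses.foldl (fun a house => a.setIfInBounds house.toNat (a.getD house.toNat 0 + v)) a).getD h 0
        = a.getD h 0 + (if (h : Int) ∈ houses then v else 0) := by
  induction houses generalizing a with
  | nil => simp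
  | cons x xs ih =>
    obtain ⟨hx0, hxlen⟩ := hb x (by simp)
    have hlen1 : (a.setIfInBounds x.toNat (a.getD x.toNat 0 + v)).size = a.size :=
      Array.size_setIfInBounds
    obtain ⟨ihlen, ihget⟩ := ih (a.setIfInBounds x.toNat (a.getD x.toNat 0 + v)) hnd.of_cons
      (fun y hy => by rw [hlen1]; exact hb y (by simp [hy]))
    refine ⟨by rw [List.foldl_cons, ihlen, hlen1], ?_⟩
    intro h
    rw [List.foldl_cons, ihget h, pv_setadd_getD a x.toNat v hxlen h]
    have hxxs : x ∉ xs := (List.nodup_cons.mp hnd).1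
    by_cases hh : (h : Int) = x
    · have hhx : h = x.toNat := by omega
      have hnx : (h : Int) ∉ xs := hh ▸ hxxs
      rw [if_pos hhx, if_neg hnx, if_pos (by simp [hh] : (h : Int) ∈ x :: xs)]
      ring
    · have hhx : h ≠ x.toNat := by omega
      simp only [List.mem_cons, hh, false_or, if_neg hhx]
      ring

-- one elf's scatter: adds elf*11 exactly on the elf's visited houses
lemma pv_scatter_inv (elf : Int) (a : Array Int) (he : 1 ≤ elf) :
    (pvElfScatter elf a).size = a.size ∧
    ∀ h : Nat,
      (pvElfScatter elf a).getD h 0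
        = a.getD h 0 +
          (if (h : Int) ∈ PySem.List.pyRange elf (min (elf * 50) ((a.size : ℕ) : Int)) elf
           then elf * 11 else 0) := by
  have hnd : (PySem.List.pyRange elf (min (elf * 50) ((a.size : ℕ) : Int)) elf).Nodup := by
    rw [PySem.List.pyRange_of_pos _ _ (by omega : (0:Int) < elf)]
    refine List.Nodup.map ?_ List.nodup_range
    intro x y hxy
    simp only [add_right_inj] at hxy
    have : (x : Int) = y := mul_left_cancel₀ (by omega : (elf:Int) ≠ 0) hxy
    exact_mod_cast this
  have hb : ∀ x ∈ PySem.List.pyRange elf (min (elf * 50) ((a.size : ℕ) : Int)) elf,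
      0 ≤ x ∧ x.toNat < a.size := by
    intro x hx
    rw [PySem.List.mem_pyRange_iff_of_pos (by omega : (0:Int) < elf)] at hx
    exact ⟨by omega, by omega⟩
  exact pv_inner_inv (elf * 11) _ a hnd hb

-- the whole sieve: closed form of every cell after the elves elf, elf+1, …, L-1 ran
lemma pv_sieve_inv (L elf : Int) (a : Array Int) (he : 1 ≤ elf) :
    (pvSieve L elf a).size = a.size ∧
    ∀ h : Nat,
      (pvSieve L elf a).getD h 0
        = a.getD h 0 +
          ((PySem.List.pyRange elf L 1).map (fun e =>
              if (h : Int) ∈ PySem.List.pyRange e (min (e * 50) ((a.size : ℕ) : Int)) e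
              then e * 11 else 0)).sum := by
  by_cases hlt : elf < L
  · obtain ⟨slen, sget⟩ := pv_scatter_inv elf a he
    obtain ⟨ihlen, ihget⟩ := pv_sieve_inv L (elf + 1) (pvElfScatter elf a) (by omega)
    rw [pvSieve, dif_pos hlt]
    refine ⟨by rw [ihlen, slen], ?_⟩
    intro h
    rw [ihget h, sget h, slen, PySem.List.pyRange_one_cons hlt, List.map_cons, List.sum_cons]
    ring
  · rw [pvSieve, dif_neg hlt, PySem.List.pyRange_one_eq_nil (by omega : L ≤ elf)]
    simp
  termination_by (L - elf).toNat
  decreasing_by omega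

lemma pv_bij (hn Ln : ℕ) (h1 : 1 ≤ hn) (h2 : hn < Ln) :
    ∑ i ∈ (Finset.range (Ln - 1)).filter (fun i => (i + 1) ∣ hn ∧ hn < 50 * (i + 1)), 11 * (i + 1)
      = ∑ j ∈ (Finset.range 49).filter (fun j => (j + 1) ∣ hn), hn / (j + 1) * 11 := by
  refine Finset.sum_nbij' (fun i => hn / (i + 1) - 1) (fun j => hn / (j + 1) - 1) ?_ ?_ ?_ ?_ ?_
  · intro a ha
    simp only [Finset.mem_filter, Finset.mem_range] at ha ⊢
    obtain ⟨hr, hdvd, hcap⟩ := ha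
    have hle : a + 1 ≤ hn := Nat.le_of_dvd (by omega) hdvd
    have h1d : 1 ≤ hn / (a + 1) := (Nat.one_le_div_iff (by omega)).mpr hle
    have hlt : hn / (a + 1) < 50 := (Nat.div_lt_iff_lt_mul (by omega)).mpr (by omega)
    have hdd : hn / (a + 1) ∣ hn := Nat.div_dvd_of_dvd hdvd
    constructor
    · omega
    · have : hn / (a + 1) - 1 + 1 = hn / (a + 1) := by omega
      rw [this]; exact hdd
  · intro b hb
    simp only [Finset.mem_filter, Finset.mem_range] at hb ⊢
    obtain ⟨hr, hdvd⟩ := hb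
    have hle : b + 1 ≤ hn := Nat.le_of_dvd (by omega) hdvd
    have h1d : 1 ≤ hn / (b + 1) := (Nat.one_le_div_iff (by omega)).mpr hle
    have hdd : hn / (b + 1) ∣ hn := Nat.div_dvd_of_dvd hdvd
    have hsub : hn / (b + 1) - 1 + 1 = hn / (b + 1) := by omega
    have hdle : hn / (b + 1) ≤ hn := Nat.div_le_self _ _
    refine ⟨by omega, ?_, ?_⟩
    · rw [hsub]; exact hdd
    · rw [hsub]
      obtain ⟨c, hc⟩ := hdvd
      have hcdiv : hn / (b + 1) = c := by rw [hc]; exact Nat.mul_div_cancel_left c (by omega)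
      have h49 : (b + 1) * c ≤ 49 * c := Nat.mul_le_mul_right c (by omega)
      rw [hcdiv]
      omega
  · intro a ha
    simp only [Finset.mem_filter, Finset.mem_range] at ha
    obtain ⟨hr, hdvd, hcap⟩ := ha
    have hle : a + 1 ≤ hn := Nat.le_of_dvd (by omega) hdvd
    have h1d : 1 ≤ hn / (a + 1) := (Nat.one_le_div_iff (by omega)).mpr hle
    have hsub : hn / (a + 1) - 1 + 1 = hn / (a + 1) := by omega
    show hn / (hn / (a + 1) - 1 + 1) - 1 = a
    rw [hsub, Nat.div_div_self hdvd (by omega)]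
    omega
  · intro b hb
    simp only [Finset.mem_filter, Finset.mem_range] at hb
    obtain ⟨hr, hdvd⟩ := hb
    have hle : b + 1 ≤ hn := Nat.le_of_dvd (by omega) hdvd
    have h1d : 1 ≤ hn / (b + 1) := (Nat.one_le_div_iff (by omega)).mpr hle
    have hsub : hn / (b + 1) - 1 + 1 = hn / (b + 1) := by omega
    show hn / (hn / (b + 1) - 1 + 1) - 1 = b
    rw [hsub, Nat.div_div_self hdvd (by omega)]
    omega
  · intro a ha
    simp only [Finset.mem_filter, Finset.mem_range] at ha
    obtain ⟨hr, hdvd, hcap⟩ := ha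
    have hle : a + 1 ≤ hn := Nat.le_of_dvd (by omega) hdvd
    have h1d : 1 ≤ hn / (a + 1) := (Nat.one_le_div_iff (by omega)).mpr hle
    have hsub : hn / (a + 1) - 1 + 1 = hn / (a + 1) := by omega
    show 11 * (a + 1) = hn / (hn / (a + 1) - 1 + 1) * 11
    rw [hsub, Nat.div_div_self hdvd (by omega)]
    omega

lemma pv_presents_eq (hn : ℕ) :
    pvPresents (hn : Int)
      = ((∑ j ∈ (Finset.range 49).filter (fun j => (j + 1) ∣ hn), hn / (j + 1) * 11 : ℕ) : ℤ) := by
  unfold pvPresents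
  have hbody : (fun (s k : Int) => if PySem.Int.mod (hn : Int) k == 0 then s + PySem.Int.floordiv (hn : Int) k * 11 else s)
      = fun s k => s + (if PySem.Int.mod (hn : Int) k == 0 then PySem.Int.floordiv (hn : Int) k * 11 else 0) := by
    funext s k
    by_cases h : PySem.Int.mod (hn : Int) k == 0 <;> simp [h]
  rw [hbody, PySem.List.foldl_add, PySem.List.pyRange_one]
  have h49 : ((50 : Int) - 1).toNat = 49 := by decide
  rw [h49, List.map_map, zero_add]
  have hsum : ∀ (f : ℕ → ℤ) (n : ℕ), ((List.range n).map f).sum = ∑ i ∈ Finset.range n, f i :=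
    fun f n => rfl
  rw [hsum]
  rw [Finset.sum_filter, Nat.cast_sum]
  refine Finset.sum_congr rfl ?_
  intro j hj
  have hcast : (1 : Int) + (j : Int) = ((j + 1 : ℕ) : Int) := by push_cast; ring
  simp only [Function.comp_apply, hcast]
  have hmod : (PySem.Int.mod (hn : Int) ((j + 1 : ℕ) : Int) == 0) = decide ((j + 1) ∣ hn) := by
    by_cases hd : (j + 1) ∣ hn
    · have h2 : ((j : Int) + 1) ∣ (hn : Int) := by exact_mod_cast Int.natCast_dvd_natCast.mpr hd
      simp [h2, hd]
    · have h2 : ¬ ((j : Int) + 1) ∣ (hn : Int) := by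
        intro hc
        exact hd (by exact_mod_cast hc)
      simp [h2, hd]
  rw [hmod]
  by_cases hd : (j + 1) ∣ hn
  · simp only [hd, decide_true, if_true, PySem.Int.floordiv_natCast]
    push_cast
    ring
  · simp [hd]

lemma pv_cell_sum (hn Ln : ℕ) (h1 : 1 ≤ hn) (h2 : hn < Ln) :
    ((PySem.List.pyRange 1 (Ln : Int) 1).map (fun e =>
        if (hn : Int) ∈ PySem.List.pyRange e (min (e * 50) ((Ln : ℕ) : Int)) e then e * 11 else 0)).sum
      = ((∑ i ∈ (Finset.range (Ln - 1)).filter (fun i => (i + 1) ∣ hn ∧ hn < 50 * (i + 1)), 11 * (i + 1) : ℕ) : ℤ) := by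
  rw [PySem.List.pyRange_one]
  have hL1 : ((Ln : Int) - 1).toNat = Ln - 1 := by omega
  rw [hL1, List.map_map]
  have hsum : ∀ (f : ℕ → ℤ) (n : ℕ), ((List.range n).map f).sum = ∑ i ∈ Finset.range n, f i :=
    fun f n => rfl
  rw [hsum, Finset.sum_filter, Nat.cast_sum]
  refine Finset.sum_congr rfl ?_
  intro i hi
  simp only [Finset.mem_range] at hi
  simp only [Function.comp_apply]
  have hcast : (1 : Int) + (i : Int) = ((i + 1 : ℕ) : Int) := by push_cast; ring
  rw [hcast]
  have he1 : (0 : Int) < ((i + 1 : ℕ) : Int) := by positivity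
  have hmem : ((hn : Int) ∈ PySem.List.pyRange ((i + 1 : ℕ) : Int) (min (((i + 1 : ℕ) : Int) * 50) ((Ln : ℕ) : Int)) ((i + 1 : ℕ) : Int))
      ↔ ((i + 1) ∣ hn ∧ hn < 50 * (i + 1)) := by
    rw [PySem.List.mem_pyRange_iff_of_pos he1, lt_min_iff]
    constructor
    · rintro ⟨hle, ⟨hc1, hc2⟩, hdvd⟩
      have hdvd2 : ((i + 1 : ℕ) : Int) ∣ (hn : Int) := by
        have := dvd_add hdvd (dvd_refl ((i + 1 : ℕ) : Int))
        simpa using this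
      refine ⟨Int.natCast_dvd_natCast.mp hdvd2, ?_⟩
      have : (hn : Int) < ((50 * (i + 1) : ℕ) : Int) := by push_cast; push_cast at hc1; linarith
      exact_mod_cast this
    · rintro ⟨hdvd, hcap⟩
      have hdvd2 : ((i + 1 : ℕ) : Int) ∣ (hn : Int) := Int.natCast_dvd_natCast.mpr hdvd
      have hle : ((i + 1 : ℕ) : Int) ≤ (hn : Int) := Int.le_of_dvd (by exact_mod_cast h1) hdvd2
      refine ⟨hle, ⟨?_, by exact_mod_cast h2⟩, ?_⟩
      · have : (hn : Int) < ((50 * (i + 1) : ℕ) : Int) := by exact_mod_cast hcap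
        push_cast at this ⊢; linarith
      · exact dvd_sub hdvd2 (dvd_refl _)
  by_cases hc : (i + 1) ∣ hn ∧ hn < 50 * (i + 1)
  · rw [if_pos (hmem.mpr hc), if_pos hc]
    push_cast; ring
  · rw [if_neg (fun hx => hc (hmem.mp hx)), if_neg hc]
    rfl

-- A's scan and B's search walk the same counter and agree once their tests agree
lemma pv_scan_eq_search (t L house : Int) (a : Array Int)
    (hpred : ∀ x : Int, house ≤ x → x < L → a.getD x.toNat 0 = pvPresents x) :
    pvScan t L house a = pvSearch t L house := by
  by_cases hlt : house < L
  · rw [pvScan, dif_pos hlt, pvSearch, dif_pos hlt,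
      hpred house le_rfl hlt,
      pv_scan_eq_search t L (house + 1) a (fun x hx1 hx2 => hpred x (by omega) hx2)]
  · rw [pvScan, dif_neg hlt, pvSearch, dif_neg hlt]
  termination_by (L - house).toNat
  decreasing_by omega

-- the two ports agree on every target (the port-level equality needs no precondition)
lemma pv_ports_eq (t : Int) : find_lowest_house2 t = find_lowest_house2_alt t := by
  unfold find_lowest_house2 find_lowest_house2_alt
  dsimp only
  generalize PySem.Int.floordiv t 11 + 1 = mh
  have hsz0 : (Array.replicate mh.toNat (0:Int)).size = mh.toNat := Array.size_replicate
  obtain ⟨slen, sget⟩ := pv_sieve_inv ((Array.replicate mh.toNat (0:Int)).size : Int) 1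
    (Array.replicate mh.toNat (0:Int)) le_rfl
  have hS : (pvSieve ((Array.replicate mh.toNat (0:Int)).size : Int) 1
      (Array.replicate mh.toNat (0:Int))).size = mh.toNat := slen.trans hsz0
  rw [hS]
  by_cases hm : 0 ≤ mh
  · have hcast : ((mh.toNat : ℕ) : Int) = mh := Int.toNat_of_nonneg hm
    rw [hcast]
    refine pv_scan_eq_search t mh 1 _ ?_
    intro x hx1 hx2
    have hx0 : (0:Int) ≤ x := by omega
    have hxc : ((x.toNat : ℕ) : Int) = x := Int.toNat_of_nonneg hx0
    have hn1 : 1 ≤ x.toNat := by omega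
    have hn2 : x.toNat < mh.toNat := by omega
    rw [sget x.toNat]
    have hrep : (Array.replicate mh.toNat (0:Int)).getD x.toNat 0 = 0 := by
      rw [Array.getD_eq_getD_getElem?, Array.getElem?_replicate]
      split <;> rfl
    rw [hrep, zero_add, hsz0]
    rw [pv_cell_sum x.toNat mh.toNat hn1 hn2, pv_bij x.toNat mh.toNat hn1 hn2,
      ← pv_presents_eq x.toNat, hxc]
  · have h0 : ((mh.toNat : ℕ) : Int) = 0 := by omega
    rw [h0, pvScan, dif_neg (by omega : ¬ (1:Int) < 0),
      pvSearch, dif_neg (by omega : ¬ (1:Int) < mh)]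

-- ===== VERDICT (by name: the statement is the Claim_ definition above) =====
theorem find_lowest_house2_spec : Claim_equal_find_lowest_house2 := by
  intro t _ _
  unfold Spec_find_lowest_house2
  exact pv_ports_eq t
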